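-- pv_equiv track=rewrite | github.com/jaobernardi/ads | semestre_1/algoritimos/aula_6/Ayesa Dos Santos - João Lucas Bernardi.py | posicoes_zero
-- ===== SOURCE A (Python) =====
-- def posicoes_zero(lista_1, lista_2):
--     output = []
--     for lista in [lista_1, lista_2]:
--         for index, value in enumerate(lista):
--             if value  == 0 and index not in output:
--                 output.append(index)
--     output.sort()
--     return output
-- ===== SOURCE B (Python) =====
-- def posicoes_zero(lista_1, lista_2):
--     output = []
--     for i in range(max(len(lista_1), len(lista_2))):
--         if (i < len(lista_1) and lista_1[i] == 0) or (i < len(lista_2) and lista_2[i] == 0):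
--             output.append(i)
--     return output
-- ===== Notes on version B (the rewrite author's own statement) =====
-- stated objective: alternative
-- what changed: B makes a single pass over the index range up to max(len), emitting each index whose guarded lookup in either list is zero, so the indices come out already unique and sorted and A's two value-enumerations with a membership dedup scan and a final sort disappear.
import Mathlib
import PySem

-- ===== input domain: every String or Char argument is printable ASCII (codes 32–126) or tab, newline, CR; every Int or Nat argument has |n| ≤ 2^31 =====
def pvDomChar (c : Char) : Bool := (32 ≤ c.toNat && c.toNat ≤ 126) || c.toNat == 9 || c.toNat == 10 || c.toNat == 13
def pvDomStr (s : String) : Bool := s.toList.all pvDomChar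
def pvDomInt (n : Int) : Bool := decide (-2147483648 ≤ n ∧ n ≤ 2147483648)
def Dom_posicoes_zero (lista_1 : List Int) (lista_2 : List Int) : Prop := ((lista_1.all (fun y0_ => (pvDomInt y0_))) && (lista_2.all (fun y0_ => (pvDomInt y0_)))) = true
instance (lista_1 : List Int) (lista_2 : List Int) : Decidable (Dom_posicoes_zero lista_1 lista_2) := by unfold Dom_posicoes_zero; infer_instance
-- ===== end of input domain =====

-- B replaces A's two value-enumerations + membership dedup + final sort with one guarded pass
-- over the index range up to max(len), which emits the indices already unique and in order (objective: alternative).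

-- ===== PORT A =====
def posicoes_zero (lista_1 : List Int) (lista_2 : List Int) : List Int :=
  let output := [lista_1, lista_2].foldl
    (fun out lista =>
      (PySem.List.enumerate lista 0).foldl
        (fun o iv => if iv.2 = 0 ∧ iv.1 ∉ o then o ++ [iv.1] else o) out) []
  PySem.List.sorted output (fun x => x) false

-- ===== PORT B =====
def posicoes_zero_alt (lista_1 : List Int) (lista_2 : List Int) : List Int :=
  (PySem.List.pyRange 0 (max (lista_1.length : Int) (lista_2.length : Int)) 1).foldl
    (fun output i =>
      if (i < (lista_1.length : Int) ∧ PySem.List.pyGetD lista_1 i 1 = 0) ∨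
         (i < (lista_2.length : Int) ∧ PySem.List.pyGetD lista_2 i 1 = 0)
      then output ++ [i] else output) []

-- ===== PRECONDITION & SPEC =====
def Spec_posicoes_zero (lista_1 : List Int) (lista_2 : List Int) (out : List Int) : Prop := out = posicoes_zero_alt lista_1 lista_2
instance (lista_1 : List Int) (lista_2 : List Int) (out : List Int) : Decidable (Spec_posicoes_zero lista_1 lista_2 out) := by unfold Spec_posicoes_zero; infer_instance

-- ===== CLAIM (what is proved, stated in full; the proofs are below) =====
def Claim_equal_posicoes_zero : Prop := ∀ (lista_1 : List Int) (lista_2 : List Int), Dom_posicoes_zero lista_1 lista_2 → Spec_posicoes_zero lista_1 lista_2 (posicoes_zero lista_1 lista_2)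

-- ===== LEMMAS AND PROOFS =====

-- membership in A's inner loop result: acc plus every index of a zero in the list (shifted by the start)
theorem pv_inner_mem (l : List Int) (s : Int) (acc : List Int) (x : Int) :
    x ∈ (PySem.List.enumerate l s).foldl
          (fun o iv => if iv.2 = 0 ∧ iv.1 ∉ o then o ++ [iv.1] else o) acc
    ↔ x ∈ acc ∨ ∃ (k : Nat) (h : k < l.length), l[k] = 0 ∧ x = s + k := by
  induction l generalizing s acc with
  | nil => simp [PySem.List.enumerate_nil]
  | cons a l ih =>
    rw [PySem.List.enumerate_cons, List.foldl_cons, ih]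
    constructor
    · rintro (hmem | ⟨k, hk, hz, hx⟩)
      · by_cases hc : a = 0 ∧ s ∉ acc
        · simp only [if_pos hc, List.mem_append, List.mem_singleton] at hmem
          rcases hmem with h | h
          · exact Or.inl h
          · exact Or.inr ⟨0, by simp, by simpa using hc.1, by simpa using h⟩
        · rw [if_neg hc] at hmem; exact Or.inl hmem
      · exact Or.inr ⟨k + 1, by simpa using hk, by simpa using hz, by rw [hx]; push_cast; ring⟩
    · rintro (hmem | ⟨k, hk, hz, hx⟩)
      · left; split_ifs with hc
        · exact List.mem_append_left _ hmem
        · exact hmem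
      · match k, hk with
        | 0, _ =>
          simp only [List.getElem_cons_zero] at hz
          by_cases hs : s ∈ acc
          · left; split_ifs with hc
            · exact List.mem_append_left _ (by simpa [hx] using hs)
            · simpa [hx] using hs
          · rw [if_pos ⟨hz, hs⟩]; left
            simp [hx]
        | k + 1, hk =>
          refine Or.inr ⟨k, by simpa using hk, by simpa using hz, ?_⟩
          rw [hx]; push_cast; ring

-- A's inner loop preserves Nodup (the 'index not in output' test is exactly the guard)
theorem pv_inner_nodup (l : List Int) (s : Int) (acc : List Int) (hacc : acc.Nodup) :
    ((PySem.List.enumerate l s).foldl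
        (fun o iv => if iv.2 = 0 ∧ iv.1 ∉ o then o ++ [iv.1] else o) acc).Nodup := by
  induction l generalizing s acc with
  | nil => simpa [PySem.List.enumerate_nil] using hacc
  | cons a l ih =>
    rw [PySem.List.enumerate_cons, List.foldl_cons]
    apply ih
    split_ifs with hc
    · exact List.Nodup.append hacc (List.nodup_singleton s) (by simpa using hc.2)
    · exact hacc

-- B is the filter of the index range by the zero test
theorem pv_alt_eq_filter (l1 l2 : List Int) :
    posicoes_zero_alt l1 l2 =
      (PySem.List.pyRange 0 (max (l1.length : Int) (l2.length : Int)) 1).filter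
        (fun i => decide ((i < (l1.length : Int) ∧ PySem.List.pyGetD l1 i 1 = 0) ∨
                          (i < (l2.length : Int) ∧ PySem.List.pyGetD l2 i 1 = 0))) := by
  unfold posicoes_zero_alt
  rw [PySem.List.foldl_append_ite_eq_filter]
  simp

theorem pv_alt_pairwise (l1 l2 : List Int) :
    (posicoes_zero_alt l1 l2).Pairwise (· < ·) := by
  rw [pv_alt_eq_filter]
  exact (PySem.List.pairwise_lt_pyRange_one 0 _).filter _

theorem pv_mem_alt (l1 l2 : List Int) (x : Int) :
    x ∈ posicoes_zero_alt l1 l2 ↔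
      (∃ (k : Nat) (h : k < l1.length), l1[k] = 0 ∧ x = (k : Int)) ∨
      (∃ (k : Nat) (h : k < l2.length), l2[k] = 0 ∧ x = (k : Int)) := by
  rw [pv_alt_eq_filter]
  simp only [List.mem_filter, PySem.List.mem_pyRange_one, decide_eq_true_eq]
  constructor
  · rintro ⟨⟨hx0, hxn⟩, h | h⟩
    · refine Or.inl ⟨x.toNat, by omega, ?_, by omega⟩
      rw [← PySem.List.pyGetD_eq_getElem l1 1 hx0 h.1]; exact h.2
    · refine Or.inr ⟨x.toNat, by omega, ?_, by omega⟩
      rw [← PySem.List.pyGetD_eq_getElem l2 1 hx0 h.1]; exact h.2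
  · rintro (⟨k, hk, hz, hx⟩ | ⟨k, hk, hz, hx⟩)
    · refine ⟨⟨by omega, by omega⟩, Or.inl ⟨by omega, ?_⟩⟩
      rw [PySem.List.pyGetD_eq_getElem l1 (i := x) 1 (by omega) (by omega)]
      have hxk : x.toNat = k := by omega
      simp only [hxk]; exact hz
    · refine ⟨⟨by omega, by omega⟩, Or.inr ⟨by omega, ?_⟩⟩
      rw [PySem.List.pyGetD_eq_getElem l2 (i := x) 1 (by omega) (by omega)]
      have hxk : x.toNat = k := by omega
      simp only [hxk]; exact hz

-- ===== VERDICT (by name: the statement is the Claim_ definition above) =====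
theorem posicoes_zero_spec : Claim_equal_posicoes_zero := by
  intro l1 l2 _
  unfold Spec_posicoes_zero posicoes_zero
  simp only [List.foldl_cons, List.foldl_nil]
  set out := (PySem.List.enumerate l2 0).foldl
      (fun o iv => if iv.2 = 0 ∧ iv.1 ∉ o then o ++ [iv.1] else o)
      ((PySem.List.enumerate l1 0).foldl
        (fun o iv => if iv.2 = 0 ∧ iv.1 ∉ o then o ++ [iv.1] else o) []) with hout
  have hmem : ∀ x, x ∈ out ↔ x ∈ posicoes_zero_alt l1 l2 := by
    intro x
    rw [hout, pv_inner_mem, pv_inner_mem, pv_mem_alt]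
    simp
  have hnd : out.Nodup := by
    rw [hout]; exact pv_inner_nodup _ _ _ (pv_inner_nodup _ _ _ List.nodup_nil)
  have hndB : (posicoes_zero_alt l1 l2).Nodup :=
    (pv_alt_pairwise l1 l2).imp (fun h => ne_of_lt h)
  have hperm : (posicoes_zero_alt l1 l2).Perm out :=
    (List.perm_ext_iff_of_nodup hndB hnd).2 (fun a => (hmem a).symm)
  exact PySem.List.sorted_eq_of_perm_of_pairwise_lt out _ (fun x => x) hperm
    (pv_alt_pairwise l1 l2)
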